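-- pv_equiv track=rewrite | github.com/Sulkz/python-grind-2025 | notes/membership_test.py | solution
-- ===== SOURCE A (Python) =====
-- def solution(visits):
-- # Map weekday strings to numbers
--     day_map = {
--         "Mon": 0, "Tue": 1, "Wed": 2,
--         "Thu": 3, "Fri": 4, "Sat": 5, "Sun": 6
--     }
--
--     # This list will hold each visit’s real “calendar day”
--     total_days = []
--
--     # Used to push weeks forward
--     offset = 0
--
--     for i in range(len(visits)):
--         current_day = visits[i]
--         val = day_map[current_day]
--         # Checks visit after the first visit to see if its in the same week or second week
--         # If current day appears earlier in the week than the last one,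
--         # it means we wrapped into a new week → add 7
--         if i > 0 and val <= day_map[visits[i - 1]]:
--             offset += 7
--
--         # Save the simulated day in calendar time
--         total_days.append(val + offset)
--
--     # Count how many cards are needed
--     cards = 0
--     week_end = -1
--
--     for day in total_days:
--         if day > week_end:
--             cards += 1
--             week_start = day - (day % 7)
--             week_end = week_start + 6
--
--     return cards
-- ===== SOURCE B (Python) =====
-- def solution(visits):
--     day_map = {"Mon": 0, "Tue": 1, "Wed": 2, "Thu": 3, "Fri": 4, "Sat": 5, "Sun": 6}
--     nums = [day_map[v] for v in visits]
--     if not nums: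
--         return 0
--     return 1 + sum(1 for prev, cur in zip(nums, nums[1:]) if cur <= prev)
-- ===== Notes on version B (the rewrite author's own statement) =====
-- stated objective: simpler
-- what changed: Replaces the calendar-day reconstruction (offset accumulation, simulated day list, greedy week-window scan with modulo arithmetic) by a single pass that counts weekday descents in adjacent pairs: cards = 1 + number of wraps, 0 for empty input.
import Mathlib
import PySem

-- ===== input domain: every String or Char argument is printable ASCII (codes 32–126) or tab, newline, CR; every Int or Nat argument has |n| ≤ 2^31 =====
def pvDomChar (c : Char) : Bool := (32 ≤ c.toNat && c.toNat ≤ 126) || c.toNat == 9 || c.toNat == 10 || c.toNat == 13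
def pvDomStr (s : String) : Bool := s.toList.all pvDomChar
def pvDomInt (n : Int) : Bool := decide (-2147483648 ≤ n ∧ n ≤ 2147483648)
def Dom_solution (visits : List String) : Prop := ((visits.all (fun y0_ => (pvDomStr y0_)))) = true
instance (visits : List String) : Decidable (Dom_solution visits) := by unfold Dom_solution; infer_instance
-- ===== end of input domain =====

-- B replaces A's calendar-day reconstruction and greedy week-window scan by a single
-- count of adjacent weekday descents (cards = 1 + wraps, 0 if empty): simpler, same cost.


-- ===== PORT A =====
def pvDayMap : PySem.Dict String Int :=
  PySem.Dict.mk [("Mon",0),("Tue",1),("Wed",2),("Thu",3),("Fri",4),("Sat",5),("Sun",6)]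

-- day_map[k] raises KeyError for a missing key; Pre_solution excludes that, getD 0 is the total form.
def solution (visits : List String) : Int :=
  let st := (PySem.List.pyRange 0 (PySem.List.len visits) 1).foldl
    (fun (st : List Int × Int) i =>
      let current_day := PySem.List.pyGetD visits i ""
      let val := PySem.Dict.getD pvDayMap current_day 0
      let offset := if i > 0 ∧ val ≤ PySem.Dict.getD pvDayMap (PySem.List.pyGetD visits (i-1) "") 0
                    then st.2 + 7 else st.2
      (st.1 ++ [val + offset], offset))
    ([], 0)
  (st.1.foldl (fun (c : Int × Int) day =>
      if day > c.2 then (c.1 + 1, (day - PySem.Int.mod day 7) + 6) else c)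
    ((0 : Int), (-1 : Int))).1

-- ===== PORT B =====
def solution_alt (visits : List String) : Int :=
  let nums := visits.map (fun v => PySem.Dict.getD pvDayMap v 0)
  match nums with
  | [] => 0
  | _ :: _ =>
      1 + (nums.zip nums.tail).foldl
            (fun (acc : Int) (p : Int × Int) => if p.2 ≤ p.1 then acc + 1 else acc) 0

-- ===== PRECONDITION & SPEC =====
-- Pre_: every visit must be one of the seven weekday keys; on any other string both Pythons raise KeyError.
def Pre_solution (visits : List String) : Prop :=
  (visits.all (fun v => PySem.Dict.contains pvDayMap v)) = true
instance (visits : List String) : Decidable (Pre_solution visits) := by unfold Pre_solution; infer_instance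
def pvWitness_solution : List String := ["Mon", "Wed", "Tue", "Sun"]

def Spec_solution (visits : List String) (out : Int) : Prop := out = solution_alt visits
instance (visits : List String) (out : Int) : Decidable (Spec_solution visits out) := by unfold Spec_solution; infer_instance

-- ===== CLAIM (what is proved, stated in full; the proofs are below) =====
def Claim_equal_solution : Prop := ∀ (visits : List String), Dom_solution visits → Pre_solution visits → Spec_solution visits (solution visits)

-- ===== LEMMAS AND PROOFS =====

def pvLk (v : String) : Int := PySem.Dict.getD pvDayMap v 0

-- A's first loop, restructured as a recursion over the weekday-number list, previous value carried
def pvBuild (prev offset : Int) : List Int → List Int × Int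
  | [] => ([], offset)
  | v :: rest =>
      let o := if v ≤ prev then offset + 7 else offset
      let r := pvBuild v o rest
      ((v + o) :: r.1, r.2)

-- number of adjacent descents, previous value carried
def pvDesc (prev : Int) : List Int → Int
  | [] => 0
  | v :: rest => (if v ≤ prev then (1:Int) else 0) + pvDesc v rest

-- A's first-loop state as a function of the weekday-number list
def pvState : List Int → List Int × Int
  | [] => ([], 0)
  | v :: rest => (v :: (pvBuild v 0 rest).1, (pvBuild v 0 rest).2)

theorem pvLk_bounds (v : String) : 0 ≤ pvLk v ∧ pvLk v < 7 := by
  unfold pvLk pvDayMap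
  rw [PySem.Dict.getD, PySem.Dict.get?_mk_cons, PySem.Dict.get?_mk_cons, PySem.Dict.get?_mk_cons,
      PySem.Dict.get?_mk_cons, PySem.Dict.get?_mk_cons, PySem.Dict.get?_mk_cons, PySem.Dict.get?_mk_cons]
  split_ifs <;> simp [PySem.Dict.get?]

-- B's zip-fold counts descents
theorem pvZip (rest : List Int) : ∀ (prev acc : Int),
    ((prev :: rest).zip rest).foldl
      (fun (acc : Int) (p : Int × Int) => if p.2 ≤ p.1 then acc + 1 else acc) acc
      = acc + pvDesc prev rest := by
  induction rest with
  | nil => intro prev acc; simp [pvDesc]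
  | cons v rest ih =>
      intro prev acc
      simp only [List.zip_cons_cons, List.foldl_cons, pvDesc, ih]
      split_ifs <;> ring

-- A's second loop over the simulated days built by pvBuild counts descents
theorem pvCards (rest : List Int) : ∀ (prev offset cards : Int), (7 ∣ offset) →
    (∀ x ∈ rest, 0 ≤ x ∧ x < 7) →
    (pvBuild prev offset rest).1.foldl
      (fun (c : Int × Int) day =>
        if day > c.2 then (c.1 + 1, (day - PySem.Int.mod day 7) + 6) else c)
      (cards, offset + 6)
      = (cards + pvDesc prev rest, (pvBuild prev offset rest).2 + 6) := by
  induction rest with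
  | nil => intro prev offset cards _ _; simp [pvBuild, pvDesc]
  | cons v rest ih =>
      intro prev offset cards hdvd hb
      have hv : 0 ≤ v ∧ v < 7 := hb v (by simp)
      have hb' : ∀ x ∈ rest, 0 ≤ x ∧ x < 7 := fun x hx => hb x (by simp [hx])
      simp only [pvBuild, pvDesc, List.foldl_cons]
      by_cases hle : v ≤ prev
      · have hmod : PySem.Int.mod (v + (offset + 7)) 7 = v := by
          rw [PySem.Int.mod_eq_emod_of_pos (by norm_num)]; omega
        simp only [hle, if_true, gt_iff_lt]
        rw [if_pos (show offset + 6 < v + (offset + 7) by omega), hmod,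
            show v + (offset + 7) - v + 6 = (offset + 7) + 6 by ring,
            ih v (offset + 7) (cards + 1) (by omega) hb',
            show cards + 1 + pvDesc v rest = cards + (1 + pvDesc v rest) by ring]
      · simp only [hle, if_false, gt_iff_lt]
        rw [if_neg (show ¬ (offset + 6 < v + offset) by omega), ih v offset cards hdvd hb',
            show cards + pvDesc v rest = cards + (0 + pvDesc v rest) by ring]

-- snoc unfolding of pvBuild: the new element is compared with the last of (prev :: rest)
theorem pvBuild_snoc (v : Int) : ∀ (rest : List Int) (prev offset : Int),
    pvBuild prev offset (rest ++ [v]) =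
      (let r := pvBuild prev offset rest
       let p := (prev :: rest).getLast (by simp)
       let o := if v ≤ p then r.2 + 7 else r.2
       (r.1 ++ [v + o], o)) := by
  intro rest
  induction rest with
  | nil => intro prev offset; simp [pvBuild]
  | cons w rest ih =>
      intro prev offset
      simp only [List.cons_append, pvBuild, ih]
      simp [List.getLast_cons]

-- A's index loop, re-expressed as pvState of the weekday numbers seen so far
theorem pvLoop (visits : List String) : ∀ (n : Nat), n ≤ visits.length →
    (List.range n).foldl
      (fun (st : List Int × Int) (k : Nat) =>
        let current_day := PySem.List.pyGetD visits ((k : Nat) : Int) ""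
        let val := PySem.Dict.getD pvDayMap current_day 0
        let offset := if ((k : Nat) : Int) > 0 ∧
            val ≤ PySem.Dict.getD pvDayMap (PySem.List.pyGetD visits (((k : Nat) : Int) - 1) "") 0
          then st.2 + 7 else st.2
        (st.1 ++ [val + offset], offset)) ([], 0)
      = pvState ((visits.take n).map pvLk) := by
  intro n
  induction n with
  | zero => intro _; simp [pvState]
  | succ m ih =>
      intro hle
      have hm : m < visits.length := by omega
      rw [List.range_succ, List.foldl_append, ih (by omega), List.foldl_cons, List.foldl_nil]
      have hget : PySem.List.pyGetD visits ((m : Nat) : Int) "" = visits[m] := by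
        rw [PySem.List.pyGetD_natCast, List.getD_eq_getElem _ _ hm]
      have htake : visits.take (m + 1) = visits.take m ++ [visits[m]] := by
        rw [List.take_add_one]; simp [List.getElem?_eq_getElem hm]
      by_cases hm0 : m = 0
      · subst hm0
        have hget0 : PySem.List.pyGetD visits (0 : Int) "" = visits[0] := by
          rw [PySem.List.pyGetD_zero, List.getD_eq_getElem _ _ hm]
        simp [pvState, hget0, pvLk, pvBuild, htake]
      · have hpos : ((m : Nat) : Int) > 0 := by omega
        have hm1 : (((m : Nat) : Int) - 1) = ((m - 1 : Nat) : Int) := by omega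
        have hm1lt : m - 1 < visits.length := by omega
        have hgetp : PySem.List.pyGetD visits (((m : Nat) : Int) - 1) "" = visits[m - 1] := by
          rw [hm1, PySem.List.pyGetD_natCast, List.getD_eq_getElem _ _ hm1lt]
        -- the list so far is nonempty
        have hlen : ((visits.take m).map pvLk).length = m := by
          simp [List.length_take]; omega
        obtain ⟨v, rest, hvr⟩ : ∃ v rest, (visits.take m).map pvLk = v :: rest := by
          cases hx : (visits.take m).map pvLk with
          | nil => rw [hx] at hlen; simp at hlen; omega
          | cons a b => exact ⟨a, b, rfl⟩
        have hne : (visits.take m).map pvLk ≠ [] := by rw [hvr]; simp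
        have hlast : (v :: rest).getLast (by simp) = pvLk visits[m - 1] := by
          have h2 : (visits.take m).getLast? = some visits[m - 1] := by
            rw [List.getLast?_eq_getElem?]
            have hlen2 : (visits.take m).length = m := by simp [List.length_take]; omega
            rw [hlen2, List.getElem?_take_of_lt (by omega), List.getElem?_eq_getElem hm1lt]
          have h1 : ((visits.take m).map pvLk).getLast? = some (pvLk visits[m - 1]) := by
            rw [List.getLast?_map, h2]; rfl
          rw [hvr, List.getLast?_eq_some_getLast (by simp)] at h1
          exact Option.some.inj h1
        rw [htake, List.map_append, hvr]
        simp only [List.map_cons, List.map_nil, pvState, List.cons_append,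
          pvBuild_snoc, hget, hgetp, hlast, hpos, true_and]
        simp [pvLk]

-- ===== VERDICT (by name: the statement is the Claim_ definition above) =====
theorem solution_spec : Claim_equal_solution := by
  intro visits _ _
  unfold Spec_solution solution solution_alt
  have hrange : PySem.List.pyRange 0 (PySem.List.len visits) 1
      = (List.range visits.length).map (fun k : Nat => ((k : Nat) : Int)) := by
    rw [PySem.List.pyRange_one]
    simp [PySem.List.len_eq]
  rw [hrange, List.foldl_map, pvLoop visits visits.length (le_refl _), List.take_length]
  have hmap : visits.map (fun v => PySem.Dict.getD pvDayMap v 0) = visits.map pvLk := rfl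
  rw [hmap]
  cases hvm : visits.map pvLk with
  | nil => simp [pvState]
  | cons v rest =>
      have hbounds : ∀ x ∈ visits.map pvLk, 0 ≤ x ∧ x < 7 := by
        intro x hx
        obtain ⟨s, _, hs⟩ := List.mem_map.mp hx
        rw [← hs]; exact pvLk_bounds s
      rw [hvm] at hbounds
      have hv : 0 ≤ v ∧ v < 7 := hbounds v (by simp)
      have hb' : ∀ x ∈ rest, 0 ≤ x ∧ x < 7 := fun x hx => hbounds x (by simp [hx])
      simp only [pvState, List.foldl_cons]
      rw [if_pos (show (-1 : Int) < v by omega)]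
      have hmodv : PySem.Int.mod v 7 = v := by
        rw [PySem.Int.mod_eq_emod_of_pos (by norm_num)]; omega
      rw [hmodv, show v - v + 6 = (0 : Int) + 6 by ring,
          pvCards rest v 0 (0 + 1) (by omega) hb']
      simp only [List.tail_cons, pvZip]
      ring
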